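-- pv_equiv track=rewrite | github.com/eliottcassidy2000/math | 04-computation/ramsey_matroid_23.py | hook_lengths
-- ===== SOURCE A (Python) =====
-- def hook_lengths(partition):
--     """Return all hook lengths of a partition."""
--     hooks = []
--     n = len(partition)
--     for i in range(n):
--         for j in range(partition[i]):
--             arm = partition[i] - j - 1
--             leg = sum(1 for k in range(i+1, n) if partition[k] > j)
--             hooks.append(arm + leg + 1)
--     return sorted(hooks, reverse=True)
-- ===== SOURCE B (Python) =====
-- def hook_lengths(partition):
--     """Return all hook lengths of a partition.
--
--     One backward pass: below[j] counts the later rows longer than j, so each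
--     cell's leg is a dictionary lookup instead of a rescan of the tail.
--     """
--     below = {}
--     hooks = []
--     for p in reversed(partition):
--         for j in range(p):
--             c = below.get(j, 0)
--             hooks.append(p - j + c)
--             below[j] = c + 1
--     return sorted(hooks, reverse=True)
-- ===== Notes on version B (the rewrite author's own statement) =====
-- stated objective: alternative
-- what changed: Single backward pass maintaining a counter below[j] of later rows longer than j, so each cell's leg is a dictionary lookup instead of rescanning the whole tail of the partition per cell.
import Mathlib
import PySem

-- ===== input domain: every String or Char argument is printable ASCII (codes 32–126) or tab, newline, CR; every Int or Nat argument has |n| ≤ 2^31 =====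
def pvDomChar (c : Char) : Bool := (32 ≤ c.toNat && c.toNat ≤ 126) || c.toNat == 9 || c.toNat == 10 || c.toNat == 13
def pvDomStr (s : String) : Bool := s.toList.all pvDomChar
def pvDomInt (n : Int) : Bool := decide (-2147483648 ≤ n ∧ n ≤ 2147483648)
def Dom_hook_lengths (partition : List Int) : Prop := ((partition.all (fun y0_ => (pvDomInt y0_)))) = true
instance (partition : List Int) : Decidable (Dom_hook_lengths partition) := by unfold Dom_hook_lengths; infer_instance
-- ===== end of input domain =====

-- B replaces the per-cell rescan of the tail by one backward pass with a counter
-- dictionary (an alternative algorithm), computing the same multiset of hooks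
-- before the same descending sort.

-- ===== PORT A =====
def hook_lengths (partition : List Int) : List Int :=
  let n : Int := partition.length
  let hooks : List Int :=
    (PySem.List.pyRange 0 n 1).foldl (fun hooks i =>
      (PySem.List.pyRange 0 (PySem.List.pyGetD partition i 0) 1).foldl (fun hooks j =>
        let arm := PySem.List.pyGetD partition i 0 - j - 1
        let leg : Int :=
          (((PySem.List.pyRange (i + 1) n 1).filter
              (fun k => decide (PySem.List.pyGetD partition k 0 > j))).length : Int)
        hooks ++ [arm + leg + 1]) hooks) []
  PySem.List.sorted hooks (fun x => x) true

-- ===== PORT B =====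
def hook_lengths_alt (partition : List Int) : List Int :=
  let st : PySem.Dict Int Int × List Int :=
    partition.reverse.foldl (fun st p =>
      (PySem.List.pyRange 0 p 1).foldl (fun (st : PySem.Dict Int Int × List Int) j =>
        let c := st.1.getD j 0
        (st.1.insert j (c + 1), st.2 ++ [p - j + c])) st)
      (PySem.Dict.empty, [])
  PySem.List.sorted st.2 (fun x => x) true

-- ===== PRECONDITION & SPEC =====
def Spec_hook_lengths (partition : List Int) (out : List Int) : Prop := out = hook_lengths_alt partition
instance (partition : List Int) (out : List Int) : Decidable (Spec_hook_lengths partition out) := by unfold Spec_hook_lengths; infer_instance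

-- ===== CLAIM (what is proved, stated in full; the proofs are below) =====
def Claim_equal_hook_lengths : Prop := ∀ (partition : List Int), Dom_hook_lengths partition → Spec_hook_lengths partition (hook_lengths partition)

-- ===== LEMMAS AND PROOFS =====

-- the hooks of one row of length p whose later rows are `suffix`
def pvRow (p : Int) (suffix : List Int) : List Int :=
  (PySem.List.pyRange 0 p 1).map
    (fun j => p - j + ((suffix.countP (fun q => decide (j < q)) : Nat) : Int))

-- A's hooks, top row first; the extra suffix s sits below all rows of the list
def pvArows : List Int → List Int → List Int
  | [], _ => []
  | p :: rest, s => pvRow p (rest ++ s) ++ pvArows rest s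

-- B's hooks: rows in processing order, `suffix` = rows already processed (below)
def pvBrows : List Int → List Int → List Int
  | [], _ => []
  | p :: rest, suffix => pvRow p suffix ++ pvBrows rest (p :: suffix)

lemma pvNodup_pyRange (p : Int) : (PySem.List.pyRange 0 p 1).Nodup :=
  PySem.List.nodup_pyRange_one 0 p

lemma pvCount_pyRange (p x : Int) (hx : 0 ≤ x) :
    ((PySem.List.pyRange 0 p 1).count x : Int) = if x < p then 1 else 0 := by
  rw [(pvNodup_pyRange p).count]
  by_cases h : x < p
  · simp [h, PySem.List.mem_pyRange_one, hx]
  · simp [h, PySem.List.mem_pyRange_one]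

-- B's inner loop: hooks grow by one row computed from the entry dict, and the
-- dict counts get one more for every j of the row
lemma pvB_inner (p : Int) (js : List Int) (h : js.Nodup)
    (d : PySem.Dict Int Int) (acc : List Int) :
    (js.foldl (fun (st : PySem.Dict Int Int × List Int) j =>
        (st.1.insert j (st.1.getD j 0 + 1), st.2 ++ [p - j + st.1.getD j 0])) (d, acc))
      = ((js.foldl (fun (st : PySem.Dict Int Int × List Int) j =>
          (st.1.insert j (st.1.getD j 0 + 1), st.2 ++ [p - j + st.1.getD j 0])) (d, acc)).1,
        acc ++ js.map (fun j => p - j + d.getD j 0))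
    ∧ ∀ x, (js.foldl (fun (st : PySem.Dict Int Int × List Int) j =>
        (st.1.insert j (st.1.getD j 0 + 1), st.2 ++ [p - j + st.1.getD j 0])) (d, acc)).1.getD x 0
        = d.getD x 0 + js.count x := by
  induction js generalizing d acc with
  | nil => simp
  | cons j rest ih =>
    have hnd : rest.Nodup := h.of_cons
    have hj : j ∉ rest := by simp_all
    obtain ⟨ih1, ih2⟩ := ih hnd (d.insert j (d.getD j 0 + 1)) (acc ++ [p - j + d.getD j 0])
    constructor
    · simp only [List.foldl_cons]
      rw [ih1]
      have hmap : rest.map (fun j' => p - j' + (d.insert j (d.getD j 0 + 1)).getD j' 0)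
          = rest.map (fun j' => p - j' + d.getD j' 0) := by
        apply List.map_congr_left
        intro j' hj'
        have : j' ≠ j := fun e => hj (e ▸ hj')
        rw [PySem.Dict.getD_insert]
        simp [this]
      simp [List.map_cons, hmap, List.append_assoc]
    · intro x
      simp only [List.foldl_cons]
      rw [ih2 x, PySem.Dict.getD_insert, List.count_cons]
      by_cases hx : x = j
      · simp [hx]; ring
      · have : ¬ (j = x) := fun e => hx e.symm
        simp [hx, this]

-- B's row loop: starting from a dict that counts `suffix`, the hooks produced are pvBrows
lemma pvB_outer (rs : List Int) (d : PySem.Dict Int Int) (acc suffix : List Int)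
    (hd : ∀ x, 0 ≤ x → d.getD x 0 = ((suffix.countP (fun q => decide (x < q)) : Nat) : Int)) :
    (rs.foldl (fun st p =>
        (PySem.List.pyRange 0 p 1).foldl (fun (st : PySem.Dict Int Int × List Int) j =>
          (st.1.insert j (st.1.getD j 0 + 1), st.2 ++ [p - j + st.1.getD j 0])) st)
      (d, acc)).2 = acc ++ pvBrows rs suffix := by
  induction rs generalizing d acc suffix with
  | nil => simp [pvBrows]
  | cons p rest ih =>
    obtain ⟨h1, h2⟩ := pvB_inner p (PySem.List.pyRange 0 p 1) (pvNodup_pyRange p) d acc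
    simp only [List.foldl_cons]
    rw [h1]
    have hrow : (PySem.List.pyRange 0 p 1).map (fun j => p - j + d.getD j 0) = pvRow p suffix := by
      apply List.map_congr_left
      intro j hj
      have hj0 : 0 ≤ j := (PySem.List.mem_pyRange_one.mp hj).1
      rw [hd j hj0]
    rw [hrow]
    rw [ih _ _ (p :: suffix) ?_]
    · simp [pvBrows, List.append_assoc]
    · intro x hx
      rw [h2 x, hd x hx, List.countP_cons]
      have := pvCount_pyRange p x hx
      by_cases hxp : x < p
      · simp [hxp] at this ⊢; omega
      · simp [hxp] at this ⊢; omega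

lemma pvBrows_append (a b s : List Int) :
    pvBrows (a ++ b) s = pvBrows a s ++ pvBrows b (a.reverse ++ s) := by
  induction a generalizing s with
  | nil => simp [pvBrows]
  | cons p rest ih =>
    simp only [List.cons_append, pvBrows, ih (p :: s), List.reverse_cons, List.append_assoc]
    simp

lemma pvPerm_BA (l s : List Int) : (pvBrows l.reverse s).Perm (pvArows l s) := by
  induction l generalizing s with
  | nil => simp [pvBrows, pvArows]
  | cons p rest ih =>
    have : (p :: rest).reverse = rest.reverse ++ [p] := by simp
    rw [this, pvBrows_append]
    have hone : pvBrows [p] (rest.reverse.reverse ++ s) = pvRow p (rest ++ s) := by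
      simp [pvBrows]
    rw [hone]
    refine List.Perm.trans List.perm_append_comm ?_
    exact (ih s).append_left _

-- A's double loop produces pvArows
lemma pvA_flat (partition : List Int) (a : Nat) (ha : a ≤ partition.length) :
    (PySem.List.pyRange (a : Int) (partition.length : Int) 1).flatMap (fun i =>
      (PySem.List.pyRange 0 (PySem.List.pyGetD partition i 0) 1).map (fun j =>
        PySem.List.pyGetD partition i 0 - j - 1 +
          (((PySem.List.pyRange (i + 1) (partition.length : Int) 1).filter
              (fun k => decide (PySem.List.pyGetD partition k 0 > j))).length : Int) + 1))
    = pvArows (partition.drop a) [] := by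
  induction hk : partition.length - a generalizing a with
  | zero =>
    have hnil : PySem.List.pyRange (a : Int) (partition.length : Int) 1 = [] := by
      rw [PySem.List.pyRange_one]
      have h0 : ((partition.length : Int) - (a : Int)).toNat = 0 := by omega
      rw [h0]; simp
    have hdrop : partition.drop a = [] := List.drop_eq_nil_iff.mpr (by omega)
    rw [hnil, hdrop]
    simp [pvArows]
  | succ k ih =>
    have halt : a < partition.length := by omega
    have hlt : (a : Int) < (partition.length : Int) := by exact_mod_cast halt
    rw [PySem.List.pyRange_one_cons hlt, List.flatMap_cons]
    have hgd : PySem.List.pyGetD partition (a : Int) 0 = partition[a] :=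
      PySem.List.pyGetD_ofNat partition a 0 halt
    have hsucc : ((a : Int) + 1) = ((a + 1 : Nat) : Int) := by push_cast; ring
    have hdropmap : (PySem.List.pyRange ((a : Int) + 1) (partition.length : Int) 1).map
        (fun k => PySem.List.pyGetD partition k 0) = partition.drop (a + 1) := by
      have h0 : (0 : Int) ≤ (a : Int) + 1 := by positivity
      have hmp := PySem.List.map_pyGetD_pyRange partition 0 h0
      have hlen : PySem.List.len partition = (partition.length : Int) := by
        simp [PySem.List.len]
      have htn : ((a : Int) + 1).toNat = a + 1 := by omega
      rw [hlen, htn] at hmp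
      exact hmp
    have hleg : ∀ j : Int,
        (((PySem.List.pyRange ((a : Int) + 1) (partition.length : Int) 1).filter
            (fun k => decide (PySem.List.pyGetD partition k 0 > j))).length : Int)
        = (((partition.drop (a + 1)).countP (fun q => decide (j < q)) : Nat) : Int) := by
      intro j
      congr 1
      rw [← List.countP_eq_length_filter]
      rw [← hdropmap, List.countP_map]
      rfl
    have hhead : (PySem.List.pyRange 0 (PySem.List.pyGetD partition (a : Int) 0) 1).map (fun j =>
          PySem.List.pyGetD partition (a : Int) 0 - j - 1 +
            (((PySem.List.pyRange ((a : Int) + 1) (partition.length : Int) 1).filter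
                (fun k => decide (PySem.List.pyGetD partition k 0 > j))).length : Int) + 1)
        = pvRow partition[a] (partition.drop (a + 1)) := by
      rw [hgd]
      unfold pvRow
      apply List.map_congr_left
      intro j _
      rw [hleg j]
      ring
    have htail := ih (a + 1) (by omega) (by omega)
    rw [hhead, hsucc, htail]
    rw [List.drop_eq_getElem_cons halt]
    simp [pvArows]

-- sorting descending is invariant under permutation of the input
lemma pvSorted_rev_eq {xs ys : List Int} (h : xs.Perm ys) :
    PySem.List.sorted xs (fun x => x) true = PySem.List.sorted ys (fun x => x) true := by
  refine List.Perm.eq_of_pairwise (le := fun a b : Int => b ≤ a) ?_ ?_ ?_ ?_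
  · intro a b _ _ h1 h2; omega
  · exact PySem.List.sorted_pairwise_rev xs _
  · exact PySem.List.sorted_pairwise_rev ys _
  · exact ((PySem.List.sorted_perm xs _ _).trans h).trans (PySem.List.sorted_perm ys _ _).symm

-- ===== VERDICT (by name: the statement is the Claim_ definition above) =====
theorem hook_lengths_spec : Claim_equal_hook_lengths := by
  intro partition _
  unfold Spec_hook_lengths
  have hA : hook_lengths partition
      = PySem.List.sorted (pvArows partition []) (fun x => x) true := by
    unfold hook_lengths
    simp only [PySem.List.foldl_append_singleton_eq_map]
    simp only [PySem.List.foldl_append_eq_flatMap, List.nil_append]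
    have := pvA_flat partition 0 (Nat.zero_le _)
    simp only [Nat.cast_zero, List.drop_zero] at this
    rw [this]
  have hB : hook_lengths_alt partition
      = PySem.List.sorted (pvBrows partition.reverse []) (fun x => x) true := by
    have h2 := pvB_outer partition.reverse PySem.Dict.empty [] []
      (by intro x _; simp [PySem.Dict.getD_empty])
    rw [List.nil_append] at h2
    unfold hook_lengths_alt
    exact congrArg (fun l => PySem.List.sorted l (fun x => x) true) h2
  rw [hA, hB]
  exact pvSorted_rev_eq (pvPerm_BA partition []).symm
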